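-- pv_equiv track=rewrite | github.com/wbieniec/controlled-plag-check | obfuscation/funshuffle/funshuffle_batch.py | weighted_LCS
-- ===== SOURCE A (Python) =====
-- def weighted_LCS(perm1, perm2, token_weight_per_function: list[int]) -> float:
--     row1 = [0 for i in range(len(perm1) + 1)]
--     row2 = [0 for i in range(len(perm1) + 1)]
--     for j, ch in enumerate(perm2, start=1):
--         for i in range(1, len(perm1) + 1):
--             if perm2[j - 1] == perm1[i - 1]:
--                 row2[i] = row1[i - 1] + token_weight_per_function[i - 1]
--             else:
--                 row2[i] = max(row1[i], row2[i - 1])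
--         row1 = row2
--         row2 = [0 for i in range(len(perm1) + 1)]
--     return row1[-1]
-- ===== SOURCE B (Python) =====
-- def weighted_LCS(perm1, perm2, token_weight_per_function):
--     # Top-down, demand-driven evaluation of the same recurrence: an explicit
--     # work-stack plus a memo dict computes only the subproblems actually
--     # reachable from (len(perm2), len(perm1)); no DP rows are ever built.
--     m, n = len(perm2), len(perm1)
--     memo = {}
--     stack = [(m, n)]
--     while stack:
--         j, i = stack[-1]
--         if (j, i) in memo:
--             stack.pop()
--         elif j == 0 or i == 0:
--             memo[(j, i)] = 0
--             stack.pop()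
--         elif perm2[j - 1] == perm1[i - 1]:
--             diag = (j - 1, i - 1)
--             if diag in memo:
--                 memo[(j, i)] = memo[diag] + token_weight_per_function[i - 1]
--                 stack.pop()
--             else:
--                 stack.append(diag)
--         else:
--             up, left = (j - 1, i), (j, i - 1)
--             if up in memo and left in memo:
--                 a, b = memo[up], memo[left]
--                 memo[(j, i)] = a if a >= b else b
--                 stack.pop()
--             else:
--                 if up not in memo:
--                     stack.append(up)
--                 if left not in memo:
--                     stack.append(left)
--     return memo[(m, n)]
-- ===== Notes on version B (the rewrite author's own statement) =====
-- stated objective: alternative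
-- what changed: B replaces A's bottom-up rolling-row table with top-down, demand-driven evaluation of the recurrence: an explicit work-stack plus a memo dict computes only the subproblems reachable from (len(perm2), len(perm1)) (matches skip whole subtables); no DP rows are built.
import Mathlib
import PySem

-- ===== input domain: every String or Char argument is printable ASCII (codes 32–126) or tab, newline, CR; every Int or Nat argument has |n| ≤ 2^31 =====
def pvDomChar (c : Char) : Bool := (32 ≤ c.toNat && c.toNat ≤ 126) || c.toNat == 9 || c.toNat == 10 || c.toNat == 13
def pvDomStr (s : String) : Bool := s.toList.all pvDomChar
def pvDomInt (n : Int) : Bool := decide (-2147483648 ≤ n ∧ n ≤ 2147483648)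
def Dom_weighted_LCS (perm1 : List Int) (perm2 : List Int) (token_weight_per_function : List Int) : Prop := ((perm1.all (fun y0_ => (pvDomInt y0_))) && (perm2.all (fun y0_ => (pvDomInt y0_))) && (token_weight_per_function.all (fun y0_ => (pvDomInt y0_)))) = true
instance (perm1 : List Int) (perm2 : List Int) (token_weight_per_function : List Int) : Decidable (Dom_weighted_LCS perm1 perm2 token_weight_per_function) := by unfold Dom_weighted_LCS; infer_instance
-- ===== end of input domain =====

-- B replaces A's bottom-up rolling-row DP by top-down demand-driven evaluation of the same
-- recurrence (explicit work-stack + memo dict); same worst-case cost (objective: alternative).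

-- ===== PORT A =====
-- Literal transliteration of A: outer loop over j = 1..len(perm2) (enumerate supplies only the
-- index; the body re-reads perm2[j-1]), inner loop over i = 1..len(perm1) updating a preallocated
-- row in place (List.set); k below is Python's i-1 / j-1. token_weight_per_function[i-1] raises
-- IndexError in Python where the index is out of range — exactly the inputs Pre_ excludes — so
-- getD's default is never observed inside Pre_. row1[-1] is row1[len(perm1)] (length n+1 ≥ 1).
def weighted_LCS (perm1 : List Int) (perm2 : List Int) (token_weight_per_function : List Int) : Int :=
  let n := perm1.length
  let row1 := List.replicate (n + 1) (0 : Int)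
  let row1 := (List.range perm2.length).foldl (fun row1 j =>
    let row2 := List.replicate (n + 1) (0 : Int)
    let row2 := (List.range n).foldl (fun row2 k =>
      if perm2.getD j 0 == perm1.getD k 0 then
        row2.set (k + 1) (row1.getD k 0 + token_weight_per_function.getD k 0)
      else
        row2.set (k + 1) (max (row1.getD (k + 1) 0) (row2.getD k 0))) row2
    row2) row1
  row1.getD n 0

-- ===== PORT B =====
-- Transliteration of B (Source B): one while-loop iteration of the work-stack machine. The stack's
-- top is the list head (Python's stack[-1] is the end of the list); `in memo` is get?.isSome;
-- `a if a >= b else b` is `if b ≤ a then a else b`. Indices j, i are Python's nonnegative ints,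
-- carried as Nat; j - 1 / i - 1 occur only under j ≠ 0 / i ≠ 0, as in Python.
def bStep (p1 p2 w : List Int) (j i : Nat) (rest : List (Nat × Nat))
    (memo : PySem.Dict (Nat × Nat) Int) : List (Nat × Nat) × PySem.Dict (Nat × Nat) Int :=
  if (memo.get? (j, i)).isSome then (rest, memo)
  else if j = 0 ∨ i = 0 then (rest, memo.insert (j, i) 0)
  else if p2.getD (j - 1) 0 == p1.getD (i - 1) 0 then
    match memo.get? (j - 1, i - 1) with
    | some v => (rest, memo.insert (j, i) (v + w.getD (i - 1) 0))
    | none => ((j - 1, i - 1) :: (j, i) :: rest, memo)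
  else
    match memo.get? (j - 1, i), memo.get? (j, i - 1) with
    | some a, some b => (rest, memo.insert (j, i) (if b ≤ a then a else b))
    | mu, ml =>
      -- Python appends `up` then `left` (each only if missing): left ends on top
      let s1 := if mu.isSome then (j, i) :: rest else (j - 1, i) :: (j, i) :: rest
      ((if ml.isSome then s1 else (j, i - 1) :: s1), memo)

-- Python's `while stack:` loop; the fuel argument only makes the recursion structural and is
-- chosen large enough (proved below) that the stack always empties before it runs out.
def bRun (p1 p2 w : List Int) : Nat → List (Nat × Nat) → PySem.Dict (Nat × Nat) Int → PySem.Dict (Nat × Nat) Int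
  | 0, _, memo => memo
  | _ + 1, [], memo => memo
  | fuel + 1, (j, i) :: rest, memo =>
    let s := bStep p1 p2 w j i rest memo
    bRun p1 p2 w fuel s.1 s.2

-- memo[(m, n)] is proved present when the loop ends, so getD's default is never observed.
def weighted_LCS_alt (perm1 : List Int) (perm2 : List Int) (token_weight_per_function : List Int) : Int :=
  (bRun perm1 perm2 token_weight_per_function (3 ^ (perm2.length + perm1.length + 1))
    [(perm2.length, perm1.length)] PySem.Dict.empty).getD (perm2.length, perm1.length) 0

-- ===== PRECONDITION & SPEC =====
-- Pre_ excludes exactly the inputs where Python A raises IndexError: a token of perm1 at a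
-- position with no weight (index ≥ len(token_weight_per_function)) that also occurs in perm2,
-- so the weight lookup is reached. B raises there too.
def Pre_weighted_LCS (perm1 : List Int) (perm2 : List Int) (token_weight_per_function : List Int) : Prop :=
  ∀ i < perm1.length, token_weight_per_function.length ≤ i → perm1.getD i 0 ∉ perm2
instance (perm1 : List Int) (perm2 : List Int) (token_weight_per_function : List Int) : Decidable (Pre_weighted_LCS perm1 perm2 token_weight_per_function) := by unfold Pre_weighted_LCS; infer_instance

def pvWitness_weighted_LCS : List Int × List Int × List Int := ([1, 2, 3], [3, 1, 2], [5, 7, 2])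

def Spec_weighted_LCS (perm1 : List Int) (perm2 : List Int) (token_weight_per_function : List Int) (out : Int) : Prop := out = weighted_LCS_alt perm1 perm2 token_weight_per_function
instance (perm1 : List Int) (perm2 : List Int) (token_weight_per_function : List Int) (out : Int) : Decidable (Spec_weighted_LCS perm1 perm2 token_weight_per_function out) := by unfold Spec_weighted_LCS; infer_instance

-- ===== CLAIM (what is proved, stated in full; the proofs are below) =====
def Claim_equal_weighted_LCS : Prop := ∀ (perm1 : List Int) (perm2 : List Int) (token_weight_per_function : List Int), Dom_weighted_LCS perm1 perm2 token_weight_per_function → Pre_weighted_LCS perm1 perm2 token_weight_per_function → Spec_weighted_LCS perm1 perm2 token_weight_per_function (weighted_LCS perm1 perm2 token_weight_per_function)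

-- ===== LEMMAS AND PROOFS =====

-- The DP both programs compute: lcsF p1 p2 w j i = weighted LCS of perm2[:j] and perm1[:i].
def lcsF (p1 p2 w : List Int) : Nat → Nat → Int
  | 0, _ => 0
  | _ + 1, 0 => 0
  | j + 1, i + 1 =>
    if p2.getD j 0 == p1.getD i 0 then lcsF p1 p2 w j i + w.getD i 0
    else max (lcsF p1 p2 w j (i + 1)) (lcsF p1 p2 w (j + 1) i)
termination_by j i => (j, i)

theorem lcsF_zero_left (p1 p2 w : List Int) (i : Nat) : lcsF p1 p2 w 0 i = 0 := by
  cases i <;> simp [lcsF]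

theorem lcsF_zero_right (p1 p2 w : List Int) (j : Nat) : lcsF p1 p2 w j 0 = 0 := by
  cases j <;> simp [lcsF]

-- set on a map-over-range list
theorem set_map_range {f : Nat → Int} {N i : Nat} (v : Int) (h : i < N) :
    ((List.range N).map f).set i v = (List.range N).map (fun t => if t = i then v else f t) := by
  apply List.ext_getElem
  · simp
  · intro t ht _
    simp only [List.getElem_set, List.getElem_map, List.getElem_range]
    rcases eq_or_ne t i with rfl | hne
    · simp
    · simp [hne, Ne.symm hne]

-- A's inner loop: prefix invariant
theorem A_inner (p1 p2 w : List Int) (j k : Nat) (hk : k ≤ p1.length) :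
    (List.range k).foldl (fun row2 t =>
      if p2.getD j 0 == p1.getD t 0 then
        row2.set (t + 1) (((List.range (p1.length + 1)).map (lcsF p1 p2 w j)).getD t 0 + w.getD t 0)
      else
        row2.set (t + 1) (max (((List.range (p1.length + 1)).map (lcsF p1 p2 w j)).getD (t + 1) 0) (row2.getD t 0)))
      (List.replicate (p1.length + 1) (0 : Int))
    = (List.range (p1.length + 1)).map (fun i => if i ≤ k then lcsF p1 p2 w (j + 1) i else 0) := by
  induction k with
  | zero =>
    simp only [List.range_zero, List.foldl_nil]
    rw [show (List.range (p1.length + 1)).map (fun i => if i ≤ 0 then lcsF p1 p2 w (j + 1) i else 0)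
        = (List.range (p1.length + 1)).map (fun _ => (0 : Int)) from
      List.map_congr_left (fun i _ => by
        rcases Nat.eq_zero_or_pos i with rfl | hi
        · simp [lcsF_zero_right]
        · simp [Nat.not_le.mpr hi])]
    simp [List.map_const']
  | succ k ih =>
    rw [show List.range (k + 1) = List.range k ++ [k] from List.range_succ,
        List.foldl_append, List.foldl_cons, List.foldl_nil, ih (by omega)]
    have hk1 : k < p1.length := by omega
    rw [PySem.List.getD_map_range _ _ _ _ (by omega),
        PySem.List.getD_map_range _ _ _ _ (by omega),
        PySem.List.getD_map_range _ _ _ _ (by omega)]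
    simp only [le_refl, if_pos]
    by_cases hc : p2.getD j 0 == p1.getD k 0
    · rw [if_pos hc, set_map_range _ (by omega)]
      apply List.map_congr_left
      intro t _
      rcases eq_or_ne t (k + 1) with rfl | hne
      · have e : lcsF p1 p2 w (j + 1) (k + 1) = lcsF p1 p2 w j k + w.getD k 0 := by
          rw [lcsF, if_pos hc]
        simp [e]
      · rcases Nat.lt_or_ge t (k + 1) with h1 | h1
        · simp [hne, Nat.le_of_lt_succ h1, Nat.le_succ_of_le (Nat.le_of_lt_succ h1)]
        · have h2 : ¬ t ≤ k := by omega
          have h3 : ¬ t ≤ k + 1 := by omega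
          simp [h2, h3, hne]
    · rw [if_neg hc, set_map_range _ (by omega)]
      apply List.map_congr_left
      intro t _
      rcases eq_or_ne t (k + 1) with rfl | hne
      · have e : lcsF p1 p2 w (j + 1) (k + 1) = max (lcsF p1 p2 w j (k + 1)) (lcsF p1 p2 w (j + 1) k) := by
          rw [lcsF, if_neg (by simpa using hc)]
        simp [e]
      · rcases Nat.lt_or_ge t (k + 1) with h1 | h1
        · simp [hne, Nat.le_of_lt_succ h1, Nat.le_succ_of_le (Nat.le_of_lt_succ h1)]
        · have h2 : ¬ t ≤ k := by omega
          have h3 : ¬ t ≤ k + 1 := by omega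
          simp [h2, h3, hne]

-- A's outer loop
theorem A_outer (p1 p2 w : List Int) (j : Nat) (hj : j ≤ p2.length) :
    (List.range j).foldl (fun row1 t =>
      (List.range p1.length).foldl (fun row2 k =>
        if p2.getD t 0 == p1.getD k 0 then
          row2.set (k + 1) (row1.getD k 0 + w.getD k 0)
        else
          row2.set (k + 1) (max (row1.getD (k + 1) 0) (row2.getD k 0)))
        (List.replicate (p1.length + 1) (0 : Int)))
      (List.replicate (p1.length + 1) (0 : Int))
    = (List.range (p1.length + 1)).map (lcsF p1 p2 w j) := by
  induction j with
  | zero =>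
    simp only [List.range_zero, List.foldl_nil]
    rw [show (List.range (p1.length + 1)).map (lcsF p1 p2 w 0)
        = (List.range (p1.length + 1)).map (fun _ => (0 : Int)) from
      List.map_congr_left (fun i _ => lcsF_zero_left p1 p2 w i)]
    simp [List.map_const']
  | succ j ih =>
    rw [show List.range (j + 1) = List.range j ++ [j] from List.range_succ,
        List.foldl_append, List.foldl_cons, List.foldl_nil, ih (by omega),
        A_inner p1 p2 w j p1.length le_rfl]
    exact List.map_congr_left (fun i hi => by
      rw [if_pos (by simpa using Nat.lt_succ_iff.mp (List.mem_range.mp hi))])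

theorem A_eq_lcsF (p1 p2 w : List Int) :
    weighted_LCS p1 p2 w = lcsF p1 p2 w p2.length p1.length := by
  have h0 : weighted_LCS p1 p2 w =
      ((List.range p2.length).foldl (fun row1 t =>
        (List.range p1.length).foldl (fun row2 k =>
          if p2.getD t 0 == p1.getD k 0 then
            row2.set (k + 1) (row1.getD k 0 + w.getD k 0)
          else
            row2.set (k + 1) (max (row1.getD (k + 1) 0) (row2.getD k 0)))
          (List.replicate (p1.length + 1) (0 : Int)))
        (List.replicate (p1.length + 1) (0 : Int))).getD p1.length 0 := rfl
  rw [h0, A_outer p1 p2 w p2.length le_rfl]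
  rw [PySem.List.getD_map_range _ _ _ _ (by omega)]

-- ===== B-side proof: the stack machine computes lcsF =====

-- memo invariant: every memoized value is the DP value
def BMemoOK (p1 p2 w : List Int) (memo : PySem.Dict (Nat × Nat) Int) : Prop :=
  ∀ j i v, memo.get? (j, i) = some v → v = lcsF p1 p2 w j i

theorem bRun_nil (p1 p2 w : List Int) (f : Nat) (memo : PySem.Dict (Nat × Nat) Int) :
    bRun p1 p2 w f [] memo = memo := by
  cases f <;> rfl

theorem bRun_cons (p1 p2 w : List Int) (f j i : Nat) (rest : List (Nat × Nat))
    (memo : PySem.Dict (Nat × Nat) Int) :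
    bRun p1 p2 w (f + 1) ((j, i) :: rest) memo
      = bRun p1 p2 w f (bStep p1 p2 w j i rest memo).1 (bStep p1 p2 w j i rest memo).2 := rfl

theorem if_ge_eq_max (a b : Int) : (if b ≤ a then a else b) = max a b := by
  by_cases h : b ≤ a
  · rw [if_pos h, max_eq_left h]
  · rw [if_neg h, max_eq_right (by omega)]

-- inserting a correct value preserves the invariant
theorem BMemoOK_insert (p1 p2 w : List Int) (memo : PySem.Dict (Nat × Nat) Int)
    (j i : Nat) (v : Int) (hinv : BMemoOK p1 p2 w memo) (hv : v = lcsF p1 p2 w j i) :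
    BMemoOK p1 p2 w (memo.insert (j, i) v) := by
  intro j' i' u hu
  rw [PySem.Dict.get?_insert] at hu
  split at hu
  · rename_i h
    cases hu
    obtain ⟨h1, h2⟩ := Prod.mk.injEq .. ▸ h
    subst h1; subst h2; exact hv
  · exact hinv j' i' u hu

-- one completing step at (j, i): pops it, leaving a memo that knows (j, i)
-- (covers: already memoized / base row / match with diag known / non-match with both known)
theorem bStep_done (p1 p2 w : List Int) (j i : Nat) (rest : List (Nat × Nat))
    (memo : PySem.Dict (Nat × Nat) Int) (hinv : BMemoOK p1 p2 w memo)
    (h : (memo.get? (j, i)).isSome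
        ∨ (j = 0 ∨ i = 0)
        ∨ (j ≠ 0 ∧ i ≠ 0 ∧ (p2.getD (j - 1) 0 == p1.getD (i - 1) 0) = true
            ∧ memo.get? (j - 1, i - 1) = some (lcsF p1 p2 w (j - 1) (i - 1)))
        ∨ (j ≠ 0 ∧ i ≠ 0 ∧ (p2.getD (j - 1) 0 == p1.getD (i - 1) 0) = false
            ∧ memo.get? (j - 1, i) = some (lcsF p1 p2 w (j - 1) i)
            ∧ memo.get? (j, i - 1) = some (lcsF p1 p2 w j (i - 1)))) :
    ∃ memo', bStep p1 p2 w j i rest memo = (rest, memo')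
      ∧ BMemoOK p1 p2 w memo'
      ∧ (∀ q v, memo.get? q = some v → memo'.get? q = some v)
      ∧ memo'.get? (j, i) = some (lcsF p1 p2 w j i) := by
  rcases hm : memo.get? (j, i) with _ | v
  · -- (j, i) not memoized yet
    have hmono : ∀ (u : Int), ∀ q v, memo.get? q = some v →
        (memo.insert (j, i) u).get? q = some v := by
      intro u q v hq
      rw [PySem.Dict.get?_insert]
      split
      · rename_i he; rw [he] at hq; rw [hq] at hm; cases hm
      · exact hq
    rcases h with h | h | ⟨hj, hi, hc, hd⟩ | ⟨hj, hi, hc, hu, hl⟩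
    · rw [hm] at h; simp at h
    · -- base row: insert 0
      refine ⟨memo.insert (j, i) 0, ?_, ?_, hmono 0, ?_⟩
      · simp [bStep, hm, h]
      · exact BMemoOK_insert p1 p2 w memo j i 0 hinv (by
          rcases h with rfl | rfl
          · exact (lcsF_zero_left p1 p2 w i).symm
          · exact (lcsF_zero_right p1 p2 w j).symm)
      · rw [show lcsF p1 p2 w j i = 0 from by
            rcases h with rfl | rfl
            exacts [lcsF_zero_left p1 p2 w i, lcsF_zero_right p1 p2 w j]]
        exact PySem.Dict.get?_insert_self memo (j, i) 0
    · -- match, diag known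
      obtain ⟨j', rfl⟩ : ∃ j', j = j' + 1 := ⟨j - 1, by omega⟩
      obtain ⟨i', rfl⟩ : ∃ i', i = i' + 1 := ⟨i - 1, by omega⟩
      simp only [Nat.add_sub_cancel] at hc hd
      have hval : lcsF p1 p2 w j' i' + w.getD i' 0 = lcsF p1 p2 w (j' + 1) (i' + 1) := by
        rw [lcsF, if_pos hc]
      refine ⟨memo.insert (j' + 1, i' + 1) (lcsF p1 p2 w j' i' + w.getD i' 0), ?_, ?_, hmono _, ?_⟩
      · simp only [bStep, hm, Nat.add_sub_cancel]
        rw [if_neg (by simp), if_neg (by omega), if_pos hc, hd]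
      · exact BMemoOK_insert p1 p2 w memo _ _ _ hinv hval
      · rw [PySem.Dict.get?_insert_self memo (j' + 1, i' + 1) _, hval]
    · -- non-match, both known
      obtain ⟨j', rfl⟩ : ∃ j', j = j' + 1 := ⟨j - 1, by omega⟩
      obtain ⟨i', rfl⟩ : ∃ i', i = i' + 1 := ⟨i - 1, by omega⟩
      simp only [Nat.add_sub_cancel] at hc hu hl
      have hval : (if lcsF p1 p2 w (j' + 1) i' ≤ lcsF p1 p2 w j' (i' + 1)
            then lcsF p1 p2 w j' (i' + 1) else lcsF p1 p2 w (j' + 1) i')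
          = lcsF p1 p2 w (j' + 1) (i' + 1) := by
        rw [if_ge_eq_max]
        conv_rhs => rw [lcsF]
        rw [if_neg (by rw [hc]; exact Bool.false_ne_true)]
      refine ⟨memo.insert (j' + 1, i' + 1) (if lcsF p1 p2 w (j' + 1) i' ≤ lcsF p1 p2 w j' (i' + 1)
          then lcsF p1 p2 w j' (i' + 1) else lcsF p1 p2 w (j' + 1) i'), ?_, ?_, hmono _, ?_⟩
      · simp only [bStep, hm, Nat.add_sub_cancel]
        rw [if_neg (by simp), if_neg (by omega), if_neg (by rw [hc]; exact Bool.false_ne_true), hu, hl]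
      · exact BMemoOK_insert p1 p2 w memo _ _ _ hinv hval
      · rw [PySem.Dict.get?_insert_self memo (j' + 1, i' + 1) _, hval]
  · -- already memoized: pop, memo unchanged
    refine ⟨memo, ?_, hinv, fun q v h => h, ?_⟩
    · simp [bStep, hm]
    · rw [hm, hinv j i v hm]

-- a completing step, phrased on the runner
theorem bStep_done_run (p1 p2 w : List Int) (j i : Nat) (rest : List (Nat × Nat))
    (memo : PySem.Dict (Nat × Nat) Int) (hinv : BMemoOK p1 p2 w memo)
    (h : (memo.get? (j, i)).isSome
        ∨ (j = 0 ∨ i = 0)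
        ∨ (j ≠ 0 ∧ i ≠ 0 ∧ (p2.getD (j - 1) 0 == p1.getD (i - 1) 0) = true
            ∧ memo.get? (j - 1, i - 1) = some (lcsF p1 p2 w (j - 1) (i - 1)))
        ∨ (j ≠ 0 ∧ i ≠ 0 ∧ (p2.getD (j - 1) 0 == p1.getD (i - 1) 0) = false
            ∧ memo.get? (j - 1, i) = some (lcsF p1 p2 w (j - 1) i)
            ∧ memo.get? (j, i - 1) = some (lcsF p1 p2 w j (i - 1)))) :
    ∃ memo', (∀ f, bRun p1 p2 w (1 + f) ((j, i) :: rest) memo = bRun p1 p2 w f rest memo')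
      ∧ BMemoOK p1 p2 w memo'
      ∧ (∀ q v, memo.get? q = some v → memo'.get? q = some v)
      ∧ memo'.get? (j, i) = some (lcsF p1 p2 w j i) := by
  obtain ⟨memo', hstep, h2, h3, h4⟩ := bStep_done p1 p2 w j i rest memo hinv h
  exact ⟨memo', fun f => by rw [show 1 + f = f + 1 by omega, bRun_cons, hstep], h2, h3, h4⟩

-- main completeness lemma: from any invariant-respecting memo, a pushed (j, i) is resolved
-- within 3^(N+1) steps, after which it is memoized with its DP value
theorem bRun_complete (p1 p2 w : List Int) :
    ∀ N j i, j + i ≤ N → ∀ (memo : PySem.Dict (Nat × Nat) Int) (rest : List (Nat × Nat)),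
    BMemoOK p1 p2 w memo →
    ∃ k memo', k + 1 ≤ 3 ^ (N + 1)
      ∧ (∀ f, bRun p1 p2 w (k + f) ((j, i) :: rest) memo = bRun p1 p2 w f rest memo')
      ∧ BMemoOK p1 p2 w memo'
      ∧ (∀ q v, memo.get? q = some v → memo'.get? q = some v)
      ∧ memo'.get? (j, i) = some (lcsF p1 p2 w j i) := by
  intro N
  induction N with
  | zero =>
    intro j i hji memo rest hinv
    obtain rfl : j = 0 := by omega
    obtain rfl : i = 0 := by omega
    obtain ⟨memo', hrun, h2, h3, h4⟩ :=
      bStep_done_run p1 p2 w 0 0 rest memo hinv (Or.inr (Or.inl (Or.inl rfl)))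
    exact ⟨1, memo', by norm_num, hrun, h2, h3, h4⟩
  | succ N ih =>
    intro j i hji memo rest hinv
    have hpow : (3 : Nat) ^ (N + 1 + 1) = 3 * 3 ^ (N + 1) := by ring
    have hone : (1 : Nat) ≤ 3 ^ (N + 1) := Nat.one_le_pow _ _ (by norm_num)
    rcases hm : memo.get? (j, i) with _ | v
    · by_cases hbase : j = 0 ∨ i = 0
      · obtain ⟨memo', hrun, h2, h3, h4⟩ :=
          bStep_done_run p1 p2 w j i rest memo hinv (Or.inr (Or.inl hbase))
        exact ⟨1, memo', by omega, hrun, h2, h3, h4⟩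
      · rw [not_or] at hbase
        by_cases hc : (p2.getD (j - 1) 0 == p1.getD (i - 1) 0) = true
        · -- match case
          rcases hd : memo.get? (j - 1, i - 1) with _ | v
          · -- diag missing: push it, resolve it, then finish (j, i)
            have hstep : bStep p1 p2 w j i rest memo = ((j - 1, i - 1) :: (j, i) :: rest, memo) := by
              simp only [bStep, hm]
              rw [if_neg (by simp), if_neg (by omega), if_pos hc, hd]
            obtain ⟨k1, memo1, hk1, hrun1, hinv1, hmono1, hget1⟩ :=
              ih (j - 1) (i - 1) (by omega) memo ((j, i) :: rest) hinv
            obtain ⟨memo2, hrun2, hinv2, hmono2, hget2⟩ :=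
              bStep_done_run p1 p2 w j i rest memo1 hinv1
                (Or.inr (Or.inr (Or.inl ⟨hbase.1, hbase.2, hc, hget1⟩)))
            refine ⟨1 + k1 + 1, memo2, by omega, ?_, hinv2,
              fun q v hq => hmono2 q v (hmono1 q v hq), hget2⟩
            intro f
            rw [show 1 + k1 + 1 + f = (k1 + (1 + f)) + 1 by omega, bRun_cons, hstep,
              hrun1 (1 + f), hrun2 f]
          · -- diag known: one completing step
            have hv : v = lcsF p1 p2 w (j - 1) (i - 1) := hinv _ _ v hd
            obtain ⟨memo', hrun, h2, h3, h4⟩ :=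
              bStep_done_run p1 p2 w j i rest memo hinv
                (Or.inr (Or.inr (Or.inl ⟨hbase.1, hbase.2, hc, hv ▸ hd⟩)))
            exact ⟨1, memo', by omega, hrun, h2, h3, h4⟩
        · -- non-match case
          have hcf : (p2.getD (j - 1) 0 == p1.getD (i - 1) 0) = false := by
            rwa [Bool.not_eq_true] at hc
          rcases hu : memo.get? (j - 1, i) with _ | a <;>
            rcases hl : memo.get? (j, i - 1) with _ | b
          · -- both missing: push left then up
            have hstep : bStep p1 p2 w j i rest memo
                = ((j, i - 1) :: (j - 1, i) :: (j, i) :: rest, memo) := by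
              simp only [bStep, hm]
              rw [if_neg (by simp), if_neg (by omega), if_neg (by rw [hcf]; exact Bool.false_ne_true), hu, hl]
              simp
            obtain ⟨k1, memo1, hk1, hrun1, hinv1, hmono1, hget1⟩ :=
              ih j (i - 1) (by omega) memo ((j - 1, i) :: (j, i) :: rest) hinv
            obtain ⟨k2, memo2, hk2, hrun2, hinv2, hmono2, hget2⟩ :=
              ih (j - 1) i (by omega) memo1 ((j, i) :: rest) hinv1
            obtain ⟨memo3, hrun3, hinv3, hmono3, hget3⟩ :=
              bStep_done_run p1 p2 w j i rest memo2 hinv2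
                (Or.inr (Or.inr (Or.inr ⟨hbase.1, hbase.2, hcf, hget2, hmono2 _ _ hget1⟩)))
            refine ⟨1 + k1 + k2 + 1, memo3, by omega, ?_, hinv3,
              fun q v hq => hmono3 q v (hmono2 q v (hmono1 q v hq)), hget3⟩
            intro f
            rw [show 1 + k1 + k2 + 1 + f = (k1 + (k2 + (1 + f))) + 1 by omega, bRun_cons, hstep,
              hrun1 (k2 + (1 + f)), hrun2 (1 + f), hrun3 f]
          · -- up missing, left known
            have hb : b = lcsF p1 p2 w j (i - 1) := hinv _ _ b hl
            have hstep : bStep p1 p2 w j i rest memo = ((j - 1, i) :: (j, i) :: rest, memo) := by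
              simp only [bStep, hm]
              rw [if_neg (by simp), if_neg (by omega), if_neg (by rw [hcf]; exact Bool.false_ne_true), hu, hl]
              simp
            obtain ⟨k1, memo1, hk1, hrun1, hinv1, hmono1, hget1⟩ :=
              ih (j - 1) i (by omega) memo ((j, i) :: rest) hinv
            obtain ⟨memo2, hrun2, hinv2, hmono2, hget2⟩ :=
              bStep_done_run p1 p2 w j i rest memo1 hinv1
                (Or.inr (Or.inr (Or.inr ⟨hbase.1, hbase.2, hcf, hget1, hmono1 _ _ (hb ▸ hl)⟩)))
            refine ⟨1 + k1 + 1, memo2, by omega, ?_, hinv2,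
              fun q v hq => hmono2 q v (hmono1 q v hq), hget2⟩
            intro f
            rw [show 1 + k1 + 1 + f = (k1 + (1 + f)) + 1 by omega, bRun_cons, hstep,
              hrun1 (1 + f), hrun2 f]
          · -- up known, left missing
            have ha : a = lcsF p1 p2 w (j - 1) i := hinv _ _ a hu
            have hstep : bStep p1 p2 w j i rest memo = ((j, i - 1) :: (j, i) :: rest, memo) := by
              simp only [bStep, hm]
              rw [if_neg (by simp), if_neg (by omega), if_neg (by rw [hcf]; exact Bool.false_ne_true), hu, hl]
              simp
            obtain ⟨k1, memo1, hk1, hrun1, hinv1, hmono1, hget1⟩ :=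
              ih j (i - 1) (by omega) memo ((j, i) :: rest) hinv
            obtain ⟨memo2, hrun2, hinv2, hmono2, hget2⟩ :=
              bStep_done_run p1 p2 w j i rest memo1 hinv1
                (Or.inr (Or.inr (Or.inr ⟨hbase.1, hbase.2, hcf, hmono1 _ _ (ha ▸ hu), hget1⟩)))
            refine ⟨1 + k1 + 1, memo2, by omega, ?_, hinv2,
              fun q v hq => hmono2 q v (hmono1 q v hq), hget2⟩
            intro f
            rw [show 1 + k1 + 1 + f = (k1 + (1 + f)) + 1 by omega, bRun_cons, hstep,
              hrun1 (1 + f), hrun2 f]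
          · -- both known: one completing step
            have ha : a = lcsF p1 p2 w (j - 1) i := hinv _ _ a hu
            have hb : b = lcsF p1 p2 w j (i - 1) := hinv _ _ b hl
            obtain ⟨memo', hrun, h2, h3, h4⟩ :=
              bStep_done_run p1 p2 w j i rest memo hinv
                (Or.inr (Or.inr (Or.inr ⟨hbase.1, hbase.2, hcf, ha ▸ hu, hb ▸ hl⟩)))
            exact ⟨1, memo', by omega, hrun, h2, h3, h4⟩
    · -- (j, i) already memoized: one popping step
      obtain ⟨memo', hrun, h2, h3, h4⟩ :=
        bStep_done_run p1 p2 w j i rest memo hinv (Or.inl (by rw [hm]; rfl))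
      exact ⟨1, memo', by omega, hrun, h2, h3, h4⟩

theorem BMemoOK_empty (p1 p2 w : List Int) : BMemoOK p1 p2 w PySem.Dict.empty := by
  intro j i v h
  rw [PySem.Dict.get?_empty] at h
  cases h

theorem B_eq_lcsF (p1 p2 w : List Int) :
    weighted_LCS_alt p1 p2 w = lcsF p1 p2 w p2.length p1.length := by
  obtain ⟨k, memo', hk, hrun, _, _, hget⟩ :=
    bRun_complete p1 p2 w (p2.length + p1.length) p2.length p1.length le_rfl
      PySem.Dict.empty [] (BMemoOK_empty p1 p2 w)
  have hfuel : 3 ^ (p2.length + p1.length + 1)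
      = k + (3 ^ (p2.length + p1.length + 1) - k) := by omega
  unfold weighted_LCS_alt
  rw [hfuel, hrun, bRun_nil, PySem.Dict.getD_of_get?_eq_some memo' 0 hget]

-- ===== VERDICT (by name: the statement is the Claim_ definition above) =====
theorem weighted_LCS_spec : Claim_equal_weighted_LCS := by
  intro p1 p2 w _ _
  unfold Spec_weighted_LCS
  rw [A_eq_lcsF, B_eq_lcsF]
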